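-- pv_equiv track=rewrite | github.com/sutanSultan/Heckathon-2 | phase-3-ai-chatbot/backend/src/utils/response_processor.py | is_internal_processing
-- ===== SOURCE A (Python) =====
-- def is_internal_processing(text: str) -> bool:
--     """
--     Check if the text contains internal processing artifacts that shouldn't be shown to user.
--
--     Args:
--         text: Text to check
--
--     Returns:
--         bool: True if text contains internal processing, False otherwise
--     """
--     if not text:
--         return False
--
--     internal_indicators = [
--         'what\'s on my list',
--         'what\'s left',
--         'pending',
--         'User says',
--         'We need',
--         'Per rules',
--         'So respond with that',
--         'internal',
--         'processing',
--         'thinking',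
--         'considering',
--         'evaluating',
--         'evaluating options',
--         'considering best approach',
--         'internal processing',
--         'evaluating best option',
--         'analyzing',
--         'considering options',
--     ]
--
--     text_lower = text.lower()
--     for indicator in internal_indicators:
--         if indicator.lower() in text_lower:
--             return True
--
--     return False
-- ===== SOURCE B (Python) =====
-- _INDICATORS = (
--     "what's on my list", "what's left", "pending", "user says", "we need",
--     "per rules", "so respond with that", "internal", "processing", "thinking",
--     "considering", "evaluating", "evaluating options", "considering best approach",
--     "internal processing", "evaluating best option", "analyzing", "considering options",
-- )
--
-- # Dispatch table: first character -> indicators starting with it.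
-- _BY_FIRST = {}
-- for _ind in _INDICATORS:
--     _BY_FIRST.setdefault(_ind[0], []).append(_ind)
--
--
-- def is_internal_processing(text: str) -> bool:
--     t = text.lower()
--     for i, c in enumerate(t):
--         for ind in _BY_FIRST.get(c, ()):
--             if t.startswith(ind, i):
--                 return True
--     return False
-- ===== Notes on version B (the rewrite author's own statement) =====
-- stated objective: alternative
-- what changed: A runs one independent substring scan over the lowered text per indicator, lowering each indicator on every call; B pre-builds a first-character dispatch dict at module scope and makes a single enumerate pass over the text, testing str.startswith(ind, i) only for the indicators whose first character matches the current one.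
import Mathlib
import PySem

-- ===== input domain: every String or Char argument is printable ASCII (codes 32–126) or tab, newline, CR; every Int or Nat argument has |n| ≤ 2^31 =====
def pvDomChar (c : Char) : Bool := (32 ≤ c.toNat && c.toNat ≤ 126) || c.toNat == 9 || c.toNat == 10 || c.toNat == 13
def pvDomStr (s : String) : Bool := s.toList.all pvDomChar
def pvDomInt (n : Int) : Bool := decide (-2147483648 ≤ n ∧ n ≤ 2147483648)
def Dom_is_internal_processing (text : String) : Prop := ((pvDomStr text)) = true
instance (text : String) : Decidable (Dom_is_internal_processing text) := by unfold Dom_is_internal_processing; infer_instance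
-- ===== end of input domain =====

-- B replaces A's k independent substring scans (lowering each indicator per call) by a module-level
-- first-character dispatch dict and a single enumerate pass with startswith at each position (objective: alternative).

-- ===== PORT A =====
def pvIndicatorsA : List String :=
  ["what's on my list", "what's left", "pending", "User says", "We need",
   "Per rules", "So respond with that", "internal", "processing", "thinking",
   "considering", "evaluating", "evaluating options", "considering best approach",
   "internal processing", "evaluating best option", "analyzing", "considering options"]

def is_internal_processing (text : String) : Bool :=
  if text.toList = [] then false
  else
    let text_lower := PySem.Chars.lower text.toList
    -- 'for indicator in …: if indicator.lower() in text_lower: return True' then 'return False'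
    pvIndicatorsA.any (fun ind => PySem.Chars.isIn (PySem.Chars.lower ind.toList) text_lower)

-- ===== PORT B =====
def pvIndicatorsB : List String :=
  ["what's on my list", "what's left", "pending", "user says", "we need",
   "per rules", "so respond with that", "internal", "processing", "thinking",
   "considering", "evaluating", "evaluating options", "considering best approach",
   "internal processing", "evaluating best option", "analyzing", "considering options"]

-- module-level: for _ind in _INDICATORS: _BY_FIRST.setdefault(_ind[0], []).append(_ind)
-- (setdefault-then-append-in-place is exactly Dict.modify with default []; every literal is
--  nonempty, so _ind[0] never raises and headD ' ' is exact here)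
def pvByFirst : PySem.Dict Char (List String) :=
  pvIndicatorsB.foldl
    (fun d ind => d.modify (ind.toList.headD ' ') [] (· ++ [ind]))
    PySem.Dict.empty

def is_internal_processing_alt (text : String) : Bool :=
  let t := PySem.Chars.lower text.toList
  -- 'for i, c in enumerate(t): for ind in _BY_FIRST.get(c, ()): if t.startswith(ind, i): return True'
  -- (str.startswith(ind, i) with 0 ≤ i ≤ len(t) is startswith of t[i:], exact here)
  (PySem.List.enumerate t 0).any (fun p =>
    (pvByFirst.getD p.2 []).any (fun ind =>
      PySem.Chars.startswith (t.drop p.1.toNat) ind.toList))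

-- ===== PRECONDITION & SPEC =====
def Spec_is_internal_processing (text : String) (out : Bool) : Prop := out = is_internal_processing_alt text
instance (text : String) (out : Bool) : Decidable (Spec_is_internal_processing text out) := by unfold Spec_is_internal_processing; infer_instance

-- ===== CLAIM (what is proved, stated in full; the proofs are below) =====
def Claim_equal_is_internal_processing : Prop := ∀ (text : String), Dom_is_internal_processing text → Spec_is_internal_processing text (is_internal_processing text)

-- ===== LEMMAS AND PROOFS =====

-- the dispatch dict holds exactly the indicators keyed by their first character
lemma mem_byFirst (c : Char) (ind : String) :
    ind ∈ pvByFirst.getD c [] ↔ ind ∈ pvIndicatorsB ∧ ind.toList.headD ' ' = c := by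
  have h : pvByFirst
      = (pvIndicatorsB.map (fun s => (s.toList.headD ' ', s))).foldl
          (fun d p => d.modify p.1 [] (· ++ [p.2])) PySem.Dict.empty := by
    rw [List.foldl_map]; rfl
  rw [h, PySem.Dict.getD_foldl_modify_append]
  simp only [PySem.Dict.getD_empty, List.nil_append, List.mem_map, List.mem_filter]
  constructor
  · rintro ⟨p, ⟨⟨s, hs, rfl⟩, hc⟩, rfl⟩
    exact ⟨hs, by simpa using hc⟩
  · rintro ⟨hmem, hk⟩
    exact ⟨(c, ind), ⟨⟨ind, hmem, by simp only [hk]⟩, by simp⟩, rfl⟩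

lemma indicatorsA_lowered :
    pvIndicatorsA.map (fun s => PySem.Chars.lower s.toList) = pvIndicatorsB.map String.toList := by
  decide

lemma indicatorsB_nonempty : ∀ ind ∈ pvIndicatorsB, ind.toList ≠ [] := by
  decide

-- one indicator's 'ind in t' scan is found by the positional pass and vice versa
lemma exists_pos_iff (t : List Char) (ind : String) (hne : ind.toList ≠ []) :
    PySem.Chars.isIn ind.toList t = true
      ↔ ∃ j, ∃ hj : j < t.length, ind.toList.headD ' ' = t[j]
          ∧ PySem.Chars.startswith (t.drop j) ind.toList = true := by
  constructor
  · intro hin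
    obtain ⟨j, hj⟩ := (PySem.Chars.exists_prefix_drop_iff_isIn ind.toList t).mpr hin
    have hjlt : j < t.length := by
      by_contra hge
      rw [List.drop_eq_nil_of_le (le_of_not_gt hge)] at hj
      exact hne (List.prefix_nil.mp hj)
    obtain ⟨c, rest, hcr⟩ := List.exists_cons_of_ne_nil hne
    obtain ⟨tail, htl⟩ := hj
    have hd : t.drop j = c :: (rest ++ tail) := by rw [← htl, hcr]; simp
    refine ⟨j, hjlt, ?_, (PySem.Chars.startswith_iff _ _).mpr ⟨tail, htl⟩⟩
    have hne' : t.drop j ≠ [] := by rw [hd]; simp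
    have hq2 : (t.drop j).head? = some (t[j]'hjlt) := by
      rw [List.head?_eq_some_head hne', List.head_drop]
    have hq : (t.drop j).head? = some c := by rw [hd]; rfl
    rw [hcr, List.headD_cons]
    exact Option.some.inj (hq.symm.trans hq2)
  · rintro ⟨j, hj, _, hsw⟩
    exact (PySem.Chars.exists_prefix_drop_iff_isIn ind.toList t).mp
      ⟨j, (PySem.Chars.startswith_iff _ _).mp hsw⟩

-- ===== VERDICT (by name: the statement is the Claim_ definition above) =====
theorem is_internal_processing_spec : Claim_equal_is_internal_processing := by
  intro text _
  show is_internal_processing text = is_internal_processing_alt text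
  unfold is_internal_processing is_internal_processing_alt
  by_cases hE : text.toList = []
  · simp [hE, PySem.Chars.lower]
  · rw [if_neg hE]
    have h1 : (pvIndicatorsA.map (fun s => PySem.Chars.lower s.toList)).any
          (fun cs => PySem.Chars.isIn cs (PySem.Chars.lower text.toList))
        = pvIndicatorsA.any (fun ind =>
            PySem.Chars.isIn (PySem.Chars.lower ind.toList) (PySem.Chars.lower text.toList)) :=
      List.any_map
    rw [← h1, indicatorsA_lowered, List.any_map]
    rw [Bool.eq_iff_iff]
    simp only [List.any_eq_true, Function.comp]
    constructor
    · rintro ⟨ind, hmem, hin⟩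
      obtain ⟨j, hjlt, hhead, hsw⟩ :=
        (exists_pos_iff _ ind (indicatorsB_nonempty ind hmem)).mp hin
      refine ⟨((0 : Int) + (j : Int), (PySem.Chars.lower text.toList)[j]'hjlt), ?_, ind, ?_, ?_⟩
      · exact (PySem.List.mem_enumerate_iff _ _ _).mpr ⟨j, hjlt, rfl⟩
      · exact (mem_byFirst _ ind).mpr ⟨hmem, hhead.symm ▸ rfl⟩
      · simpa using hsw
    · rintro ⟨p, hp, ind, hind, hsw⟩
      obtain ⟨k, hk, rfl⟩ := (PySem.List.mem_enumerate_iff _ _ _).mp hp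
      refine ⟨ind, ((mem_byFirst _ ind).mp hind).1, ?_⟩
      refine (exists_pos_iff _ ind
        (indicatorsB_nonempty ind ((mem_byFirst _ ind).mp hind).1)).mpr
        ⟨k, hk, (((mem_byFirst _ ind).mp hind).2 : _), by simpa using hsw⟩
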